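-- pv_equiv track=rewrite | github.com/chenjing98/Plum | scripts/theory-improve.py | generate_init_send_rate
-- ===== SOURCE A (Python) =====
-- def generate_init_send_rate(num_client, wireless_bw):
--     # wireless_bw: list with length num_client
--     # send_rate[i][j] is the send rate from client j to client i (p2p) or client j's video transcoded from the media server (sfu)
--     send_rate = []
--     for i in range(num_client):
--         send_rate_i = []
--         for j in range(num_client):
--             if i == j:
--                 send_rate_i.append(0)
--             else:
--                 send_rate_i.append(min(wireless_bw[i], wireless_bw[j]))
--         send_rate.append(send_rate_i)
--     return send_rate
-- ===== SOURCE B (Python) =====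
-- def generate_init_send_rate(num_client, wireless_bw):
--     # Sort clients by bandwidth; processing them in ascending order, the
--     # client taken out first in a pair is the pairwise min, so flood its row
--     # and column with its own bandwidth -- no per-pair min() is computed.
--     send_rate = [[0] * num_client for _ in range(num_client)]
--     order = sorted(range(num_client), key=lambda k: wireless_bw[k])
--     while order:
--         i = order.pop(0)
--         v = wireless_bw[i]
--         for j in order:
--             send_rate[i][j] = v
--             send_rate[j][i] = v
--     return send_rate
-- ===== Notes on version B (the rewrite author's own statement) =====
-- stated objective: alternative
-- what changed: B sorts the client indices by bandwidth once and then floods each client's row and column with its own bandwidth against the still-unprocessed clients, so the matrix is built by value propagation in sorted order and no per-pair min() is ever computed; A computes min(bw[i],bw[j]) cell by cell over the full n*n grid.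
-- outside the precondition, e.g. on generate_init_send_rate(1, []): A returns [[0]], B raises IndexError
import Mathlib
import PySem

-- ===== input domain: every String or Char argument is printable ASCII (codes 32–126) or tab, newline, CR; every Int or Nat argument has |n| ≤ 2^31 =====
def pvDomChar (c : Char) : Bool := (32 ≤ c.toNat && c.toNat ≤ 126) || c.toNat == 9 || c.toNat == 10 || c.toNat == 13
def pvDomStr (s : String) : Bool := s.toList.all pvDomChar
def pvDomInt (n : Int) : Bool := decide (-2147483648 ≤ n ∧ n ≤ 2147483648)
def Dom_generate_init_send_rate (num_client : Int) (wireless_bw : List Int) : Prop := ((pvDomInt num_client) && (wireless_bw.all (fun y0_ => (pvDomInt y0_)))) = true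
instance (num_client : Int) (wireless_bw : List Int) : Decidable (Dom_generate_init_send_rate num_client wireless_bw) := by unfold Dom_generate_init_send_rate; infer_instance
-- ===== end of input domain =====

-- B sorts the clients by bandwidth once and floods each client's row/column with its own
-- bandwidth against the still-unprocessed clients (the earlier of a pair in sorted order IS the
-- pairwise min), so no per-pair min is computed; A computes min(bw[i],bw[j]) cell by cell.

-- ===== PORT A =====
-- literal transliteration of A: append a row per i, appending a cell per j
def generate_init_send_rate (num_client : Int) (wireless_bw : List Int) : List (List Int) :=
  (PySem.List.pyRange 0 num_client 1).foldl (fun send_rate i =>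
    send_rate ++ [(PySem.List.pyRange 0 num_client 1).foldl (fun send_rate_i j =>
      send_rate_i ++ [if i = j then 0
        else min (PySem.List.pyGetD wireless_bw i 0) (PySem.List.pyGetD wireless_bw j 0)]) []]) []

-- ===== PORT B =====
-- send_rate[i][j] = v  (the in-place write of Source B; indices here are always 0 ≤ i,j < n)
def pvSetN (m : List (List Int)) (i j : Nat) (v : Int) : List (List Int) :=
  m.modify i (fun row => row.set j v)

def pvSet2 (m : List (List Int)) (i j : Int) (v : Int) : List (List Int) :=
  pvSetN m i.toNat j.toNat v

-- the 'while order: i = order.pop(0); for j in order: …' loop of Source B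
def pvFill (bw : List Int) : List Int → List (List Int) → List (List Int)
  | [], m => m
  | i :: rest, m =>
      let v := PySem.List.pyGetD bw i 0
      pvFill bw rest (rest.foldl (fun m j => pvSet2 (pvSet2 m i j v) j i v) m)

def generate_init_send_rate_alt (num_client : Int) (wireless_bw : List Int) : List (List Int) :=
  pvFill wireless_bw
    (PySem.List.sorted (PySem.List.pyRange 0 num_client 1)
      (fun k => PySem.List.pyGetD wireless_bw k 0) false)
    (List.replicate num_client.toNat (List.replicate num_client.toNat 0))

-- ===== PRECONDITION & SPEC =====
-- Pre_ excludes num_client > len(wireless_bw): there A raises IndexError except at the degenerate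
-- diagonal-only input (1, []), where A returns [[0]] without ever indexing but B's sort key raises.
def Pre_generate_init_send_rate (num_client : Int) (wireless_bw : List Int) : Prop :=
  num_client ≤ (wireless_bw.length : Int)
instance (num_client : Int) (wireless_bw : List Int) : Decidable (Pre_generate_init_send_rate num_client wireless_bw) := by unfold Pre_generate_init_send_rate; infer_instance
def pvWitness_generate_init_send_rate : Int × List Int := (3, [5, 2, 7])

def Spec_generate_init_send_rate (num_client : Int) (wireless_bw : List Int) (out : List (List Int)) : Prop := out = generate_init_send_rate_alt num_client wireless_bw
instance (num_client : Int) (wireless_bw : List Int) (out : List (List Int)) : Decidable (Spec_generate_init_send_rate num_client wireless_bw out) := by unfold Spec_generate_init_send_rate; infer_instance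

-- ===== CLAIM (what is proved, stated in full; the proofs are below) =====
def Claim_equal_generate_init_send_rate : Prop := ∀ (num_client : Int) (wireless_bw : List Int), Dom_generate_init_send_rate num_client wireless_bw → Pre_generate_init_send_rate num_client wireless_bw → Spec_generate_init_send_rate num_client wireless_bw (generate_init_send_rate num_client wireless_bw)

-- ===== LEMMAS AND PROOFS =====

-- the intended entry at (i, j)
def pvCell (bw : List Int) (i j : Nat) : Int :=
  if i = j then 0 else min (bw.getD i 0) (bw.getD j 0)

def pvGetN (m : List (List Int)) (i j : Nat) : Int := (m.getD i []).getD j 0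

def pvGet2 (m : List (List Int)) (i j : Int) : Int := pvGetN m i.toNat j.toNat

def pvShape (N : Nat) (m : List (List Int)) : Prop :=
  m.length = N ∧ ∀ r ∈ m, r.length = N

-- A's result is the pointwise matrix of pvCell
theorem pvA_eq (n : Int) (bw : List Int) :
    generate_init_send_rate n bw
      = (List.range n.toNat).map (fun i => (List.range n.toNat).map (fun j => pvCell bw i j)) := by
  unfold generate_init_send_rate pvCell
  rw [PySem.List.pyRange_one]
  simp only [PySem.List.foldl_append_singleton_eq_map, List.map_map, List.nil_append, zero_add,
    Int.sub_zero, Function.comp_def, PySem.List.pyGetD_natCast, Nat.cast_inj]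

theorem pvShape_setN {N : Nat} {m : List (List Int)} (h : pvShape N m) (a b : Nat) (v : Int) :
    pvShape N (pvSetN m a b v) := by
  obtain ⟨h1, h2⟩ := h
  refine ⟨by simp [pvSetN, h1], ?_⟩
  intro r hr
  rw [pvSetN, List.mem_iff_getElem?] at hr
  obtain ⟨k, hk⟩ := hr
  rw [List.getElem?_modify] at hk
  by_cases hak : a = k
  · simp [hak] at hk
    obtain ⟨r', hr', hrr⟩ := hk
    subst hrr
    simp [h2 r' (List.mem_of_getElem? hr')]
  · simp [hak] at hk
    exact h2 r (List.mem_of_getElem? hk)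

theorem pvShape_set2 {N : Nat} {m : List (List Int)} (h : pvShape N m) (a b : Int) (v : Int) :
    pvShape N (pvSet2 m a b v) := pvShape_setN h a.toNat b.toNat v

theorem pvGetN_setN {N : Nat} {m : List (List Int)} (h : pvShape N m)
    (a b i j : Nat) (v : Int) (hb : b < N) (hi : i < N) (hj : j < N) :
    pvGetN (pvSetN m a b v) i j = if i = a ∧ j = b then v else pvGetN m i j := by
  obtain ⟨h1, h2⟩ := h
  have hil : i < m.length := by omega
  have hrow : m[i].length = N := h2 _ (List.getElem_mem hil)
  unfold pvGetN pvSetN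
  rw [List.getD_eq_getElem?_getD, List.getD_eq_getElem?_getD, List.getElem?_modify,
    List.getElem?_eq_getElem hil]
  by_cases hai : a = i
  · subst hai
    rcases eq_or_ne j b with rfl | hbj
    · simp [show j < m[a].length by omega]
    · simp [hbj, Ne.symm hbj, List.getElem?_eq_getElem hil]
  · have hia : i ≠ a := fun hh => hai hh.symm
    simp [hia, hai, List.getElem?_eq_getElem hil]

theorem pvGet2_set2 {N : Nat} {m : List (List Int)} (h : pvShape N m)
    (a b i j : Int) (v : Int)
    (ha0 : 0 ≤ a) (hb0 : 0 ≤ b) (hbN : b < (N : Int))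
    (hi0 : 0 ≤ i) (hiN : i < (N : Int)) (hj0 : 0 ≤ j) (hjN : j < (N : Int)) :
    pvGet2 (pvSet2 m a b v) i j = if i = a ∧ j = b then v else pvGet2 m i j := by
  unfold pvGet2 pvSet2
  rw [pvGetN_setN h a.toNat b.toNat i.toNat j.toNat v (by omega) (by omega) (by omega)]
  have hiff : (i.toNat = a.toNat ∧ j.toNat = b.toNat) ↔ (i = a ∧ j = b) := by omega
  simp only [hiff]

-- inner loop of Source B: flood row/column i with the constant v against every j still in 'rest'
theorem pvInnerFill (bw : List Int) (N : Nat) (i v : Int)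
    (hi0 : 0 ≤ i) (hiN : i < (N : Int)) :
    ∀ (rest : List Int) (m : List (List Int)), pvShape N m →
    (∀ j ∈ rest, 0 ≤ j ∧ j < (N : Int)) →
    pvShape N (rest.foldl (fun m j => pvSet2 (pvSet2 m i j v) j i v) m) ∧
    ∀ p q : Int, 0 ≤ p → p < (N : Int) → 0 ≤ q → q < (N : Int) →
      pvGet2 (rest.foldl (fun m j => pvSet2 (pvSet2 m i j v) j i v) m) p q
        = if (p = i ∧ q ∈ rest) ∨ (q = i ∧ p ∈ rest) then v else pvGet2 m p q := by
  intro rest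
  induction rest with
  | nil =>
      intro m hsh _
      exact ⟨hsh, by intro p q _ _ _ _; simp⟩
  | cons j rest ih =>
      intro m hsh hb
      obtain ⟨hj0, hjN⟩ := hb j (by simp)
      have hb' : ∀ x ∈ rest, 0 ≤ x ∧ x < (N : Int) := fun x hx => hb x (by simp [hx])
      have hsh1 : pvShape N (pvSet2 m i j v) := pvShape_set2 hsh i j v
      have hsh2 : pvShape N (pvSet2 (pvSet2 m i j v) j i v) := pvShape_set2 hsh1 j i v
      obtain ⟨hshF, hentF⟩ := ih (pvSet2 (pvSet2 m i j v) j i v) hsh2 hb'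
      simp only [List.foldl_cons]
      refine ⟨hshF, ?_⟩
      intro p q hp0 hpN hq0 hqN
      rw [hentF p q hp0 hpN hq0 hqN]
      have h1 : pvGet2 (pvSet2 (pvSet2 m i j v) j i v) p q
          = if p = j ∧ q = i then v else if p = i ∧ q = j then v else pvGet2 m p q := by
        rw [pvGet2_set2 hsh1 j i p q v hj0 hi0 hiN hp0 hpN hq0 hqN,
            pvGet2_set2 hsh i j p q v hi0 hj0 hjN hp0 hpN hq0 hqN]
      by_cases hc : (p = i ∧ q ∈ rest) ∨ (q = i ∧ p ∈ rest)
      · have hc' : (p = i ∧ q ∈ j :: rest) ∨ (q = i ∧ p ∈ j :: rest) := by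
          rcases hc with ⟨ha, hb2⟩ | ⟨ha, hb2⟩
          · exact Or.inl ⟨ha, List.mem_cons_of_mem _ hb2⟩
          · exact Or.inr ⟨ha, List.mem_cons_of_mem _ hb2⟩
        rw [if_pos hc, if_pos hc']
      · rw [if_neg hc, h1]
        simp only [List.mem_cons]
        simp only [not_or, not_and] at hc
        split_ifs <;> first | rfl | (exfalso; tauto)

-- outer loop of Source B over the sorted remaining clients
theorem pvFill_spec (bw : List Int) (N : Nat) :
    ∀ (os : List Int) (m : List (List Int)), pvShape N m → os.Nodup →
    (∀ j ∈ os, 0 ≤ j ∧ j < (N : Int)) →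
    os.Pairwise (fun a b => PySem.List.pyGetD bw a 0 ≤ PySem.List.pyGetD bw b 0) →
    (∀ p q : Int, 0 ≤ p → p < (N : Int) → 0 ≤ q → q < (N : Int) →
       pvGet2 m p q = if p ≠ q ∧ ¬(p ∈ os ∧ q ∈ os)
         then min (PySem.List.pyGetD bw p 0) (PySem.List.pyGetD bw q 0) else 0) →
    pvShape N (pvFill bw os m) ∧
    ∀ p q : Int, 0 ≤ p → p < (N : Int) → 0 ≤ q → q < (N : Int) →
      pvGet2 (pvFill bw os m) p q
        = if p ≠ q then min (PySem.List.pyGetD bw p 0) (PySem.List.pyGetD bw q 0) else 0 := by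
  intro os
  induction os with
  | nil =>
      intro m hsh _ _ _ hent
      refine ⟨hsh, ?_⟩
      intro p q hp0 hpN hq0 hqN
      have := hent p q hp0 hpN hq0 hqN
      simpa using this
  | cons i rest ih =>
      intro m hsh hnd hb hpw hent
      obtain ⟨hi0, hiN⟩ := hb i (by simp)
      have hb' : ∀ x ∈ rest, 0 ≤ x ∧ x < (N : Int) := fun x hx => hb x (by simp [hx])
      rw [List.nodup_cons] at hnd
      obtain ⟨hinr, hnd'⟩ := hnd
      rw [List.pairwise_cons] at hpw
      obtain ⟨hle, hpw'⟩ := hpw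
      obtain ⟨hshF, hentF⟩ :=
        pvInnerFill bw N i (PySem.List.pyGetD bw i 0) hi0 hiN rest m hsh hb'
      show pvShape N (pvFill bw rest _) ∧ _
      apply ih _ hshF hnd' hb' hpw'
      intro p q hp0 hpN hq0 hqN
      rw [hentF p q hp0 hpN hq0 hqN]
      by_cases hc : (p = i ∧ q ∈ rest) ∨ (q = i ∧ p ∈ rest)
      · rw [if_pos hc]
        rcases hc with ⟨hpi, hqr⟩ | ⟨hqi, hpr⟩
        · have hpq : p ≠ q := fun hh => hinr (by rw [← hpi, hh]; exact hqr)
          rw [if_pos ⟨hpq, fun hpr2 => hinr (hpi ▸ hpr2.1)⟩, hpi,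
            min_eq_left (hle q hqr)]
        · have hpq : p ≠ q := fun hh => hinr (by rw [← hqi, ← hh]; exact hpr)
          rw [if_pos ⟨hpq, fun hqr2 => hinr (hqi ▸ hqr2.2)⟩, hqi,
            min_eq_right (hle p hpr)]
      · rw [if_neg hc, hent p q hp0 hpN hq0 hqN]
        have hiff : (p ≠ q ∧ ¬(p ∈ i :: rest ∧ q ∈ i :: rest))
            ↔ (p ≠ q ∧ ¬(p ∈ rest ∧ q ∈ rest)) := by
          simp only [List.mem_cons] at *
          constructor
          · rintro ⟨h1, h2⟩; exact ⟨h1, fun hb3 => h2 ⟨Or.inr hb3.1, Or.inr hb3.2⟩⟩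
          · rintro ⟨h1, h2⟩
            refine ⟨h1, fun hb3 => ?_⟩
            obtain ⟨ha, hb4⟩ := hb3
            rcases ha with ha | ha
            · rcases hb4 with hb4 | hb4
              · exact h1 (ha.trans hb4.symm)
              · exact hc (Or.inl ⟨ha, hb4⟩)
            · rcases hb4 with hb4 | hb4
              · exact hc (Or.inr ⟨hb4, ha⟩)
              · exact h2 ⟨ha, hb4⟩
        simp only [hiff]

-- the filled matrix, for ANY sorted nodup enumeration of range(n)
theorem pvFill_final (n : Int) (bw : List Int) (os : List Int)
    (hnd : os.Nodup)
    (hmem : ∀ x, x ∈ os ↔ (0 ≤ x ∧ x < n))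
    (hpw : os.Pairwise (fun a b => PySem.List.pyGetD bw a 0 ≤ PySem.List.pyGetD bw b 0)) :
    pvFill bw os (List.replicate n.toNat (List.replicate n.toNat 0))
      = (List.range n.toNat).map (fun i => (List.range n.toNat).map (fun j => pvCell bw i j)) := by
  have hb : ∀ x ∈ os, 0 ≤ x ∧ x < (n.toNat : Int) := by
    intro x hx
    obtain ⟨h1, h2⟩ := (hmem x).mp hx
    exact ⟨h1, by omega⟩
  have hshape0 : pvShape n.toNat (List.replicate n.toNat (List.replicate n.toNat (0 : Int))) :=
    ⟨by simp, by intro r hr; simp [List.eq_of_mem_replicate hr]⟩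
  have hent0 : ∀ p q : Int, 0 ≤ p → p < (n.toNat : Int) → 0 ≤ q → q < (n.toNat : Int) →
      pvGet2 (List.replicate n.toNat (List.replicate n.toNat (0 : Int))) p q
        = if p ≠ q ∧ ¬(p ∈ os ∧ q ∈ os)
          then min (PySem.List.pyGetD bw p 0) (PySem.List.pyGetD bw q 0) else 0 := by
    intro p q hp0 hpN hq0 hqN
    have hpmem : p ∈ os := (hmem p).mpr ⟨hp0, by omega⟩
    have hqmem : q ∈ os := (hmem q).mpr ⟨hq0, by omega⟩
    have hp : p.toNat < n.toNat := by omega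
    have hq : q.toNat < n.toNat := by omega
    rw [if_neg (by tauto)]
    simp [pvGet2, pvGetN, List.getD_eq_getElem?_getD, hp, hq]
  obtain ⟨⟨hlen, hrows⟩, hent⟩ := pvFill_spec bw n.toNat os _ hshape0 hnd hb hpw hent0
  apply List.ext_getElem (by simp only [List.length_map, List.length_range]; exact hlen)
  intro i hi hi2
  have hiN : i < n.toNat := by rw [hlen] at hi; exact hi
  have hrowlen := hrows _ (List.getElem_mem hi)
  apply List.ext_getElem (by simp only [List.getElem_map, List.length_map, List.length_range]; omega)
  intro j hj hj2
  have hjN : j < n.toNat := by omega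
  have hget := hent (i : Int) (j : Int) (by omega) (by omega) (by omega) (by omega)
  simp only [List.getElem_map, List.getElem_range]
  rw [pvGet2, Int.toNat_natCast, Int.toNat_natCast, pvGetN, List.getD_eq_getElem?_getD,
    List.getD_eq_getElem?_getD, List.getElem?_eq_getElem hi, Option.getD_some,
    List.getElem?_eq_getElem (by omega : j < _), Option.getD_some] at hget
  rw [hget, pvCell]
  rcases eq_or_ne i j with rfl | hij
  · simp
  · rw [if_pos (show (i : Int) ≠ (j : Int) by exact_mod_cast hij), if_neg hij]
    simp [PySem.List.pyGetD_natCast]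

-- B's result is the same pointwise matrix
theorem pvB_eq (n : Int) (bw : List Int) :
    generate_init_send_rate_alt n bw
      = (List.range n.toNat).map (fun i => (List.range n.toNat).map (fun j => pvCell bw i j)) := by
  unfold generate_init_send_rate_alt
  apply pvFill_final
  · exact (PySem.List.sorted_perm _ _ _).symm.nodup (PySem.List.nodup_pyRange_one 0 n)
  · intro x
    rw [PySem.List.mem_sorted, PySem.List.mem_pyRange_one]
  · exact PySem.List.sorted_pairwise _ _

-- ===== VERDICT (by name: the statement is the Claim_ definition above) =====
theorem generate_init_send_rate_spec : Claim_equal_generate_init_send_rate := by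
  intro n bw _ _
  unfold Spec_generate_init_send_rate
  rw [pvA_eq, pvB_eq]
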